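-- pv_equiv track=rewrite | github.com/g4mm4p4nd4/op-observe | op_observe/retrieval/rerankers.py | _count_phrase
-- ===== SOURCE A (Python) =====
-- from typing import List, Protocol, Sequence
--
-- def _count_phrase(query_tokens: Sequence[str], doc_tokens: Sequence[str]) -> int:
--     if len(query_tokens) < 2 or len(doc_tokens) < len(query_tokens):
--         return 0
--     window = len(query_tokens)
--     hits = 0
--     for index in range(len(doc_tokens) - window + 1):
--         if tuple(doc_tokens[index : index + window]) == tuple(query_tokens):
--             hits += 1
--     return hits
-- ===== SOURCE B (Python) =====
-- def _count_phrase(query_tokens, doc_tokens):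
--     q = list(query_tokens)
--     d = list(doc_tokens)
--     m = len(q)
--     if m < 2 or len(d) < m:
--         return 0
--     win = d[:m]
--     hits = 1 if win == q else 0
--     for tok in d[m:]:
--         win.pop(0)
--         win.append(tok)
--         if win == q:
--             hits += 1
--     return hits
-- ===== Notes on version B (the rewrite author's own statement) =====
-- stated objective: alternative
-- what changed: Replaced A's per-position slicing (materialising a fresh tuple of the window and of the query at every index) with a single pass that maintains a rolling window buffer, popping the front and appending the next token.
import Mathlib
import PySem

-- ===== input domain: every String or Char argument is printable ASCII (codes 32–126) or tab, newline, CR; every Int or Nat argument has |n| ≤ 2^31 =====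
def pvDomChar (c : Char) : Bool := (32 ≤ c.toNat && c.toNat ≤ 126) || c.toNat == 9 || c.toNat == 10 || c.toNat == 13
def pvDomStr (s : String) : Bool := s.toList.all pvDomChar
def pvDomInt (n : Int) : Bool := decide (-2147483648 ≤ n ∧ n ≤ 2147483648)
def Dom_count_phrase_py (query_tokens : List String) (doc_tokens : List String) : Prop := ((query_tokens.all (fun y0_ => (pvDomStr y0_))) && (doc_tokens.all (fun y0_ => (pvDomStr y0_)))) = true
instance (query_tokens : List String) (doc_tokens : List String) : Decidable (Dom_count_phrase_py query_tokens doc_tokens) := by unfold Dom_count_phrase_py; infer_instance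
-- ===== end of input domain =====

-- B replaces A's per-position slice-and-compare with a single-pass rolling window buffer (objective: alternative).

-- ===== PORT A =====
-- literal transliteration of _count_phrase: index loop over start positions, slice compared to the query
def count_phrase_py (query_tokens : List String) (doc_tokens : List String) : Int :=
  if query_tokens.length < 2 ∨ doc_tokens.length < query_tokens.length then 0
  else
    let window : Int := query_tokens.length
    (PySem.List.pyRange 0 ((doc_tokens.length : Int) - window + 1) 1).foldl
      (fun hits index =>
        if PySem.List.slice doc_tokens (some index) (some (index + window)) = query_tokens
        then hits + 1 else hits) 0

-- ===== PORT B =====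
-- transliteration of Source B: maintain a rolling window (pop front, append next token), one pass
def count_phrase_py_alt (query_tokens : List String) (doc_tokens : List String) : Int :=
  let m := query_tokens.length
  if m < 2 ∨ doc_tokens.length < m then 0
  else
    let win := doc_tokens.take m
    let hits : Int := if win = query_tokens then 1 else 0
    ((doc_tokens.drop m).foldl
      (fun s tok =>
        let w := s.1.tail ++ [tok]
        (w, s.2 + if w = query_tokens then 1 else 0)) (win, hits)).2

-- ===== PRECONDITION & SPEC =====
def Spec_count_phrase_py (query_tokens : List String) (doc_tokens : List String) (out : Int) : Prop := out = count_phrase_py_alt query_tokens doc_tokens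
instance (query_tokens : List String) (doc_tokens : List String) (out : Int) : Decidable (Spec_count_phrase_py query_tokens doc_tokens out) := by unfold Spec_count_phrase_py; infer_instance

-- ===== CLAIM (what is proved, stated in full; the proofs are below) =====
def Claim_equal_count_phrase_py : Prop := ∀ (query_tokens : List String) (doc_tokens : List String), Dom_count_phrase_py query_tokens doc_tokens → Spec_count_phrase_py query_tokens doc_tokens (count_phrase_py query_tokens doc_tokens)

-- ===== LEMMAS AND PROOFS =====

-- indicator of a match at position i
def pvMatch (q d : List String) (i : Nat) : Int :=
  if (d.drop i).take q.length = q then 1 else 0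

-- rolling the window one step to the right
theorem pv_window_step (d : List String) (i m : Nat) (hm : 1 ≤ m) (h : i + m < d.length) :
    ((d.drop i).take m).tail ++ [d[i + m]] = (d.drop (i + 1)).take m := by
  have h1 : ((d.drop i).take m).tail = (d.drop (i+1)).take (m-1) := by
    rw [← List.drop_one, List.drop_take, List.drop_drop]
  rw [h1]
  have hm1 : m = (m-1)+1 := by omega
  conv_rhs => rw [hm1, List.take_add_one]
  have hg : (d.drop (i+1))[m-1]? = some d[i+m] := by
    rw [List.getElem?_drop, List.getElem?_eq_getElem (by omega)]
    congr 1; congr 1; omega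
  rw [hg]; rfl

-- B's loop computes the sum of the match indicators at positions i+1 .. i+t
theorem pv_B_loop (q d : List String) (m : Nat) (hm : q.length = m) (h1 : 1 ≤ m) :
    ∀ (t i : Nat) (h : Int), i + m + t = d.length →
      ((List.drop (i + m) d).foldl
        (fun s tok =>
          let w := s.1.tail ++ [tok]
          (w, s.2 + if w = q then 1 else 0)) ((d.drop i).take m, h)).2
      = h + ((List.range t).map (fun k => pvMatch q d (i + 1 + k))).sum := by
  intro t
  induction t with
  | zero =>
    intro i h ht
    rw [List.drop_eq_nil_of_le (as := d) (i := i + m) (by omega)]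
    simp
  | succ t ih =>
    intro i h ht
    rw [List.drop_eq_getElem_cons (l := d) (i := i + m) (by omega), List.foldl_cons]
    rw [pv_window_step d i m h1 (by omega)]
    rw [show i + m + 1 = (i+1) + m by omega] at *
    rw [ih (i+1) _ (by omega)]
    rw [List.range_succ_eq_map, List.map_cons, List.map_map, List.sum_cons]
    have he : ((fun k => pvMatch q d (i + 1 + k)) ∘ Nat.succ) = (fun k => pvMatch q d (i + 1 + 1 + k)) := by
      funext k; simp only [Function.comp]; congr 1; omega
    rw [he]
    simp only [pvMatch, hm, Nat.add_zero]
    ring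

-- A's loop is the same sum of match indicators at positions 0 .. N-1
theorem pv_A_sum (q d : List String) (m : Nat) (hm : q.length = m) (N : Nat) :
    (PySem.List.pyRange 0 (N : Int) 1).foldl
      (fun hits index =>
        if PySem.List.slice d (some index) (some (index + (m : Int))) = q
        then hits + 1 else hits) 0
    = ((List.range N).map (fun k => pvMatch q d k)).sum := by
  rw [PySem.List.pyRange_one, List.foldl_map]
  simp only [zero_add, Int.sub_zero, Int.toNat_natCast]
  simp only [PySem.List.slice_natCast_add]
  rw [PySem.List.foldl_ite_add_one]
  simp only [pvMatch, hm]
  have hsum := PySem.List.sum_map_ite_one_zero (p := fun x => decide (List.take m (List.drop x d) = q)) (xs := List.range N)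
  simp only [decide_eq_true_eq] at hsum
  rw [hsum]
  simp

-- ===== VERDICT (by name: the statement is the Claim_ definition above) =====
theorem count_phrase_py_spec : Claim_equal_count_phrase_py := by
  intro q d _
  unfold Spec_count_phrase_py count_phrase_py count_phrase_py_alt
  by_cases hg : q.length < 2 ∨ d.length < q.length
  · simp only [hg, if_pos]
  · rw [if_neg hg, if_neg hg]
    dsimp only
    push Not at hg
    obtain ⟨h2, hn⟩ := hg
    have hcast : ((d.length : Int) - (q.length : Int) + 1) = ((d.length - q.length + 1 : Nat) : Int) := by omega
    rw [hcast, pv_A_sum q d q.length rfl (d.length - q.length + 1)]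
    have hb := pv_B_loop q d q.length rfl (by omega) (d.length - q.length) 0
      (if d.take q.length = q then 1 else 0) (by omega)
    simp only [Nat.zero_add, List.drop_zero] at hb
    rw [hb]
    rw [List.range_succ_eq_map, List.map_cons, List.map_map, List.sum_cons]
    have he : ((fun k => pvMatch q d k) ∘ Nat.succ) = (fun k => pvMatch q d (0 + 1 + k)) := by
      funext k; simp only [Function.comp]; congr 1; omega
    rw [he]
    simp [pvMatch]
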